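-- pv_equiv track=rewrite | github.com/FlimothyCrow/Python-Katas | sandbox.py | mockCase
-- ===== SOURCE A (Python) =====
-- def mockCase(string):
--     new_quote = ""
--     i = False
--     for char in string:
--         if i:
--             new_quote += char.upper()
--         else:
--             new_quote += char.lower()
--         if char != ' ':
--             i = not i
--     return new_quote
-- ===== SOURCE B (Python) =====
-- def mockCase(string):
--     letters = [c for c in string if c != ' ']
--     cased = []
--     i = 0
--     while i < len(letters):
--         # consume letters two at a time: first of each pair lowered, second uppered
--         cased.append(letters[i].lower())
--         if i + 1 < len(letters):
--             cased.append(letters[i + 1].upper())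
--         i += 2
--     it = iter(cased)
--     return ''.join(' ' if c == ' ' else next(it) for c in string)
-- ===== Notes on version B (the rewrite author's own statement) =====
-- stated objective: alternative
-- what changed: Three staged passes instead of one toggling loop: extract the non-space characters, case that letter sequence by walking it two at a time (lower the first of each pair, upper the second), then weave the cased letters back into the string over the untouched spaces with an iterator.
import Mathlib
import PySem

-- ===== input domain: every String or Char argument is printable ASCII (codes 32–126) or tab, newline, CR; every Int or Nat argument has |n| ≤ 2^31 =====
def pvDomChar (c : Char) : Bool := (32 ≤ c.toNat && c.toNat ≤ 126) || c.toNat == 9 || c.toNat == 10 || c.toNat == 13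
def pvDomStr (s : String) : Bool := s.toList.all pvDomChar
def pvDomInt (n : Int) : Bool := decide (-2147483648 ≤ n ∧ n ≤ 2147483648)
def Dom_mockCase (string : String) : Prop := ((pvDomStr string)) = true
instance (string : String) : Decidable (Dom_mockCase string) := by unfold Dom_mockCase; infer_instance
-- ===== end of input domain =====

-- B replaces A's single toggling loop by three staged passes (filter out spaces, case the letter
-- sequence pairwise-recursively, weave it back over the spaces); alternative decomposition, same cost.


-- ===== PORT A =====
-- for char in string: append char.upper()/char.lower() by flag i; toggle i when char != ' '
def mockCase (string : String) : String :=
  (string.toList.foldl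
    (fun (st : String × Bool) c =>
      (if st.2 then st.1.push (PySem.Chars.upperChar c) else st.1.push (PySem.Chars.lowerChar c),
       if c ≠ ' ' then !st.2 else st.2))
    ("", false)).1

-- ===== PORT B =====
-- the while loop: walk the letter list two indices at a time, lowering letters[i] and uppering letters[i+1]
def pvCasedGo (ls : List Char) (i : Nat) : List Char :=
  if _h : i < ls.length then
    PySem.Chars.lowerChar ls[i] ::
      ((if h2 : i + 1 < ls.length then [PySem.Chars.upperChar ls[i + 1]] else [])
        ++ pvCasedGo ls (i + 2))
  else []
termination_by ls.length - i

-- ''.join(' ' if c == ' ' else next(it) for c in string); the letter iterator never runs dry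
-- because it holds exactly one cased letter per non-space character (the [] branch is unreachable)
def pvWeave : List Char → List Char → List Char
  | [], _ => []
  | c :: cs, ls =>
    if c = ' ' then ' ' :: pvWeave cs ls
    else match ls with
      | l :: ls' => l :: pvWeave cs ls'
      | [] => pvWeave cs []

def mockCase_alt (string : String) : String :=
  String.ofList
    (pvWeave string.toList (pvCasedGo (string.toList.filter (fun c => c ≠ ' ')) 0))

-- ===== PRECONDITION & SPEC =====
def Spec_mockCase (string : String) (out : String) : Prop := out = mockCase_alt string
instance (string : String) (out : String) : Decidable (Spec_mockCase string out) := by unfold Spec_mockCase; infer_instance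

-- ===== CLAIM (what is proved, stated in full; the proofs are below) =====
def Claim_equal_mockCase : Prop := ∀ (string : String), Dom_mockCase string → Spec_mockCase string (mockCase string)

-- ===== LEMMAS AND PROOFS =====
-- letter sequence cased by an alternation flag (proof-side view of pvCasedPairs)
def pvCaseSeq (b : Bool) : List Char → List Char
  | [] => []
  | c :: cs => (if b then PySem.Chars.upperChar c else PySem.Chars.lowerChar c) :: pvCaseSeq (!b) cs

theorem pvCasedGo_eq (ls : List Char) (i : Nat) : pvCasedGo ls i = pvCaseSeq false (ls.drop i) := by
  have key : ∀ n i, ls.length - i ≤ n → pvCasedGo ls i = pvCaseSeq false (ls.drop i) := by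
    intro n
    induction n with
    | zero =>
      intro i h
      rw [pvCasedGo, dif_neg (by omega), List.drop_eq_nil_of_le (by omega)]
      rfl
    | succ n ih =>
      intro i h
      rw [pvCasedGo]
      by_cases hi : i < ls.length
      · rw [dif_pos hi, List.drop_eq_getElem_cons hi]
        by_cases h2 : i + 1 < ls.length
        · rw [dif_pos h2, List.drop_eq_getElem_cons h2, ih (i + 2) (by omega)]
          simp [pvCaseSeq]
        · rw [dif_neg h2, ih (i + 2) (by omega),
              List.drop_eq_nil_of_le (show ls.length ≤ i + 1 by omega),
              List.drop_eq_nil_of_le (show ls.length ≤ i + 2 by omega)]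
          simp [pvCaseSeq]
      · rw [dif_neg hi, List.drop_eq_nil_of_le (by omega)]
        rfl
  exact key _ i le_rfl

theorem pv_push_ofList (acc : String) (c : Char) (l : List Char) :
    acc ++ String.ofList (c :: l) = (acc.push c) ++ String.ofList l := by
  apply String.toList_injective; simp

theorem mockCase_key (l : List Char) : ∀ (acc : String) (b : Bool),
    (l.foldl
      (fun (st : String × Bool) c =>
        (if st.2 then st.1.push (PySem.Chars.upperChar c) else st.1.push (PySem.Chars.lowerChar c),
         if c ≠ ' ' then !st.2 else st.2))
      (acc, b)).1
      = acc ++ String.ofList (pvWeave l (pvCaseSeq b (l.filter (fun c => c ≠ ' ')))) := by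
  induction l with
  | nil => intro acc b; simp [pvWeave]
  | cons c cs ih =>
    intro acc b
    simp only [List.foldl_cons]
    by_cases hc : c = ' '
    · subst hc
      have e2 : (if b = true then acc.push (PySem.Chars.upperChar ' ')
                 else acc.push (PySem.Chars.lowerChar ' ')) = acc.push ' ' := by
        cases b <;> simp [show PySem.Chars.upperChar ' ' = ' ' from by decide,
                          show PySem.Chars.lowerChar ' ' = ' ' from by decide]
      simp only [ne_eq, not_true_eq_false, if_false, e2]
      rw [show (' ' :: cs).filter (fun c => c ≠ ' ') = cs.filter (fun c => c ≠ ' ') from by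
            simp [List.filter],
          show ∀ ls, pvWeave (' ' :: cs) ls = ' ' :: pvWeave cs ls from fun ls => by
            simp [pvWeave],
          pv_push_ofList]
      exact ih _ _
    · have hf : (c :: cs).filter (fun c => c ≠ ' ') = c :: cs.filter (fun c => c ≠ ' ') := by
        simp [List.filter, hc]
      have hseq : pvCaseSeq b ((c :: cs).filter (fun c => c ≠ ' '))
          = (if b then PySem.Chars.upperChar c else PySem.Chars.lowerChar c)
              :: pvCaseSeq (!b) (cs.filter (fun c => c ≠ ' ')) := by
        rw [hf]; rfl
      have hw : pvWeave (c :: cs) (pvCaseSeq b ((c :: cs).filter (fun c => c ≠ ' ')))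
          = (if b then PySem.Chars.upperChar c else PySem.Chars.lowerChar c)
              :: pvWeave cs (pvCaseSeq (!b) (cs.filter (fun c => c ≠ ' '))) := by
        rw [hseq]; simp [pvWeave, hc]
      simp only [ne_eq, hc, not_false_eq_true, if_true, hw]
      cases b
      · simp only [Bool.false_eq_true, if_false, pv_push_ofList]; exact ih _ _
      · simp only [if_true, pv_push_ofList]; exact ih _ _

-- ===== VERDICT (by name: the statement is the Claim_ definition above) =====
theorem mockCase_spec : Claim_equal_mockCase := by
  intro s _
  unfold Spec_mockCase mockCase mockCase_alt
  rw [mockCase_key s.toList "" false, pvCasedGo_eq, List.drop_zero]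
  apply String.toList_injective; simp
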